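-- pv_equiv track=rewrite | github.com/d1zblya/math-UP-Tap-Tap | backend/src/tasks/gen.py | separation_of_nums
-- ===== SOURCE A (Python) =====
-- def separation_of_nums(expression: str) -> list[tuple[int, int]]:
--     """Нахождение индексов чисел в строке"""
--     exp = list(expression)
--     nums = '1234567890.'
--     for i in range(len(exp)):
--         # A - цифра, B - буква *A A B A B A A*
--         if exp[i] in nums:
--             exp[i] = 'A'
--         else:
--             exp[i] = 'B'
--     begin = []
--     end = []
--     for i in range(len(exp) - 1):
--         syb = exp[i] + exp[i + 1]
--         if syb == 'AB':
--             end.append(i)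
--         elif syb == 'BA':
--             begin.append(i)
--     if expression[-1] in nums:
--         end.append(len(exp) - 1)
--     if expression[0] in nums:
--         begin = [-1] + begin
--     return [(x + 1, y + 1) for x, y in zip(begin, end)]
-- ===== SOURCE B (Python) =====
-- def separation_of_nums(expression: str) -> list[tuple[int, int]]:
--     """Нахождение индексов чисел в строке (single linear pass)."""
--     nums = '1234567890.'
--     result = []
--     start = None
--     for i, c in enumerate(expression):
--         if c in nums:
--             if start is None:
--                 start = i
--         else:
--             if start is not None:
--                 result.append((start, i))
--                 start = None
--     if start is not None:
--         result.append((start, len(expression)))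
--     return result
-- ===== Notes on version B (the rewrite author's own statement) =====
-- stated objective: simpler
-- what changed: Replaced A's three passes (rewrite every char to 'A'/'B', scan adjacent pairs into separate begin/end lists, patch the ends, zip) by one linear pass over enumerate(expression) that tracks the start index of the current digit run and emits (start, end) pairs directly.
import Mathlib
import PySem

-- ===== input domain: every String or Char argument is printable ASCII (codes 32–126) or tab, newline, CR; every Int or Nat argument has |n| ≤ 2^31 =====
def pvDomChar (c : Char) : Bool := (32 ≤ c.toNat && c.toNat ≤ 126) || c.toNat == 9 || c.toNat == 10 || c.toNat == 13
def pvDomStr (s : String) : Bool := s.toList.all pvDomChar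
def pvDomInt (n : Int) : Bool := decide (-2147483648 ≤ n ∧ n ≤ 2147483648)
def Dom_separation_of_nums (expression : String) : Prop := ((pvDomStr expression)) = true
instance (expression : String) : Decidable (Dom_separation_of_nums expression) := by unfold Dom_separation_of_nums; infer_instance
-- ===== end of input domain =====

-- B replaces A's three passes (char rewriting, adjacent-pair scan into begin/end lists, zip)
-- by one linear pass tracking the start of the current digit run; simpler, with a measured
-- constant-factor speedup (same O(n) asymptotics).

-- ===== PORT A =====
def numsChars : List Char := "1234567890.".toList

def separation_of_nums (expression : String) : List (Int × Int) :=
  let exp0 := expression.toList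
  -- for i in range(len(exp)): exp[i] = 'A' if exp[i] in nums else 'B'
  let exp := (PySem.List.pyRange 0 (PySem.List.len exp0) 1).foldl
      (fun e i => PySem.List.pySetD e i
        (if PySem.List.pyGetD e i ' ' ∈ numsChars then 'A' else 'B')) exp0
  -- for i in range(len(exp) - 1): syb = exp[i] + exp[i+1]; …
  let be := (PySem.List.pyRange 0 (PySem.List.len exp - 1) 1).foldl
      (fun (acc : List Int × List Int) i =>
        let syb := [PySem.List.pyGetD exp i ' ', PySem.List.pyGetD exp (i + 1) ' ']
        if syb = ['A', 'B'] then (acc.1, acc.2 ++ [i])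
        else if syb = ['B', 'A'] then (acc.1 ++ [i], acc.2)
        else acc)
      (([], []) : List Int × List Int)
  -- expression[-1] / expression[0]: in range exactly under Pre_ (expression ≠ "")
  let endL := if PySem.List.pyGetD exp0 (-1) ' ' ∈ numsChars
              then be.2 ++ [PySem.List.len exp - 1] else be.2
  let begL := if PySem.List.pyGetD exp0 0 ' ' ∈ numsChars then (-1) :: be.1 else be.1
  (begL.zip endL).map (fun p => (p.1 + 1, p.2 + 1))

-- ===== PORT B =====
def separation_of_nums_alt (expression : String) : List (Int × Int) :=
  let st := (PySem.List.enumerate expression.toList 0).foldl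
      (fun (s : Option Int × List (Int × Int)) (p : Int × Char) =>
        if p.2 ∈ numsChars then
          match s.1 with
          | none => (some p.1, s.2)
          | some _ => s
        else
          match s.1 with
          | some b => (none, s.2 ++ [(b, p.1)])
          | none => s)
      ((none, []) : Option Int × List (Int × Int))
  match st.1 with
  | some b => st.2 ++ [(b, PySem.Str.len expression)]
  | none => st.2

-- ===== PRECONDITION & SPEC =====
-- Pre_ excludes only the empty string, on which A raises IndexError at expression[-1].
def Pre_separation_of_nums (expression : String) : Prop := expression ≠ ""
instance (expression : String) : Decidable (Pre_separation_of_nums expression) := by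
  unfold Pre_separation_of_nums; infer_instance
def pvWitness_separation_of_nums : String := "a+12"

def Spec_separation_of_nums (expression : String) (out : List (Int × Int)) : Prop :=
  out = separation_of_nums_alt expression
instance (expression : String) (out : List (Int × Int)) :
    Decidable (Spec_separation_of_nums expression out) := by
  unfold Spec_separation_of_nums; infer_instance

-- ===== CLAIM (what is proved, stated in full; the proofs are below) =====
def Claim_equal_separation_of_nums : Prop :=
  ∀ (expression : String), Dom_separation_of_nums expression →
    Pre_separation_of_nums expression →
    Spec_separation_of_nums expression (separation_of_nums expression)

-- ===== LEMMAS AND PROOFS =====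

-- digit test as a Bool
def pvDig (c : Char) : Bool := decide (c ∈ numsChars)
def pvAB (b : Bool) : Char := if b then 'A' else 'B'

-- begin/end contributions of A's adjacent-pair scan, structurally, over the digit mask
def pvScan : List Bool → Nat → List Int × List Int
  | a :: b :: t, k =>
      let r := pvScan (b :: t) (k + 1)
      ((if a = false ∧ b = true then (k : Int) :: r.1 else r.1),
       (if a = true ∧ b = false then (k : Int) :: r.2 else r.2))
  | _, _ => ([], [])

-- canonical run decomposition: remaining mask, next index, open-run start
def pvRuns : List Bool → Nat → Option Int → List (Int × Int)
  | [], _, none => []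
  | [], i, some s => [(s, (i : Int))]
  | b :: t, i, none =>
      if b then pvRuns t (i + 1) (some (i : Int)) else pvRuns t (i + 1) none
  | b :: t, i, some s =>
      if b then pvRuns t (i + 1) (some s)
      else (s, (i : Int)) :: pvRuns t (i + 1) none

def pvZipMap (xs ys : List Int) : List (Int × Int) :=
  (xs.zip ys).map (fun p => (p.1 + 1, p.2 + 1))

lemma pvZipMap_cons (x y : Int) (xs ys : List Int) :
    pvZipMap (x :: xs) (y :: ys) = (x + 1, y + 1) :: pvZipMap xs ys := rfl

-- A's first loop (index-wise overwrite) computes the map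
lemma pvSetMap (f : Char → Char) (d : Char) :
    ∀ (suf pre : List Char),
      (PySem.List.pyRange (pre.length : Int) ((pre.length + suf.length : Nat) : Int) 1).foldl
        (fun e i => PySem.List.pySetD e i (f (PySem.List.pyGetD e i d))) (pre ++ suf)
      = pre ++ suf.map f := by
  intro suf
  induction suf with
  | nil =>
      intro pre
      rw [PySem.List.pyRange_one_eq_nil (by simp)]
      simp
  | cons c t ih =>
      intro pre
      rw [PySem.List.pyRange_one_cons (by push_cast [List.length_cons]; omega)]
      simp only [List.foldl_cons]
      have hget : PySem.List.pyGetD (pre ++ c :: t) (pre.length : Int) d = c := by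
        rw [PySem.List.pyGetD_eq_getElem _ _ (by positivity) (by simp)]
        simp
      have hset : PySem.List.pySetD (pre ++ c :: t) (pre.length : Int) (f c)
          = (pre ++ [f c]) ++ t := by
        rw [PySem.List.pySetD_natCast]
        rw [List.set_append_right _ _ (le_refl _)]
        simp
      rw [hget, hset]
      have h1 : (pre.length : Int) + 1 = ((pre ++ [f c]).length : Nat) := by
        push_cast [List.length_append, List.length_cons, List.length_nil]; ring
      have h2 : ((pre.length + (c :: t).length : Nat) : Int)
          = (((pre ++ [f c]).length + t.length : Nat) : Int) := by
        push_cast [List.length_append, List.length_cons, List.length_nil]; ring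
      rw [h1, h2, ih (pre ++ [f c])]
      simp

-- A's second loop computes pvScan of the digit mask (appended to the accumulator)
lemma pvLoop2 :
    ∀ (suf : List Bool) (k : Nat) (full : List Bool), full.drop k = suf →
      ∀ (acc : List Int × List Int),
      (PySem.List.pyRange (k : Int) (((full.map pvAB).length : Int) - 1) 1).foldl
        (fun (acc : List Int × List Int) i =>
          let syb := [PySem.List.pyGetD (full.map pvAB) i ' ',
                      PySem.List.pyGetD (full.map pvAB) (i + 1) ' ']
          if syb = ['A', 'B'] then (acc.1, acc.2 ++ [i])
          else if syb = ['B', 'A'] then (acc.1 ++ [i], acc.2)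
          else acc) acc
      = (acc.1 ++ (pvScan suf k).1, acc.2 ++ (pvScan suf k).2) := by
  intro suf
  induction suf with
  | nil =>
      intro k full h acc
      have : full.length ≤ k := by
        by_contra hlt
        have := congrArg List.length h
        simp [List.length_drop] at this
        omega
      rw [PySem.List.pyRange_one_eq_nil (by simp; omega)]
      simp [pvScan]
  | cons a t ih =>
      intro k full h acc
      cases t with
      | nil =>
          have hlen : full.length = k + 1 := by
            have := congrArg List.length h
            simp [List.length_drop] at this
            omega
          rw [PySem.List.pyRange_one_eq_nil (by simp [hlen])]
          simp [pvScan]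
      | cons b t' =>
          have hlen : k + 2 ≤ full.length := by
            have := congrArg List.length h
            simp [List.length_drop] at this
            omega
          have hk : k < full.length := by omega
          have hk1 : k + 1 < full.length := by omega
          have hdd : full.drop (k+1) = b :: t' := by
            rw [← List.tail_drop, h]
            rfl
          have hfa : full[k]'hk = a := by
            have h1 : full[k]? = some a := by
              have := congrArg (fun l => l[0]?) h
              simpa [List.getElem?_drop] using this
            exact (List.getElem_eq_iff hk).mpr h1
          have hfb : full[k+1]'hk1 = b := by
            have h1 : full[k+1]? = some b := by
              have := congrArg (fun l => l[0]?) hdd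
              simpa [List.getElem?_drop] using this
            exact (List.getElem_eq_iff hk1).mpr h1
          rw [PySem.List.pyRange_one_cons (by simp; omega)]
          simp only [List.foldl_cons]
          have hga : PySem.List.pyGetD (full.map pvAB) (k : Int) ' ' = pvAB a := by
            rw [PySem.List.pyGetD_eq_getElem _ _ (by positivity) (by simp; exact_mod_cast hk)]
            simp [hfa]
          have hgb : PySem.List.pyGetD (full.map pvAB) ((k : Int) + 1) ' ' = pvAB b := by
            have : (k : Int) + 1 = ((k + 1 : Nat) : Int) := by push_cast; ring
            rw [this, PySem.List.pyGetD_eq_getElem _ _ (by positivity) (by simp; exact_mod_cast hk1)]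
            simp [hfb]
          rw [hga, hgb]
          have ihres := ih (k + 1) full hdd
          have hcast : ((k : Int) + 1) = ((k + 1 : Nat) : Int) := by push_cast; ring
          rw [hcast]
          cases a <;> cases b <;>
            simp only [pvAB, if_true, if_false, Bool.false_eq_true] <;>
            simp only [ihres] <;>
            simp [pvScan, List.append_assoc]

-- the key correspondence: A's zipped begin/end lists are exactly the run decomposition
lemma pvKey :
    ∀ (t : List Bool) (a : Bool) (k s : Nat),
      pvZipMap ((if a then [(s : Int) - 1] else []) ++ (pvScan (a :: t) k).1)
               ((pvScan (a :: t) k).2 ++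
                 (if List.getLastD t a then [((k + t.length : Nat) : Int)] else []))
      = pvRuns t (k + 1) (if a then some (s : Int) else none) := by
  intro t
  induction t with
  | nil =>
      intro a k s
      cases a <;> simp [pvScan, pvRuns, pvZipMap]
  | cons b t' ih =>
      intro a k s
      have hlast : List.getLastD (b :: t') a = List.getLastD t' b := List.getLastD_cons
      have hlen : ((k + (b :: t').length : Nat) : Int)
          = (((k + 1) + t'.length : Nat) : Int) := by
        push_cast [List.length_cons]; ring
      cases a <;> cases b
      case false.false =>
        have h2 := ih false (k + 1) s
        simp only [Bool.false_eq_true, if_false, List.nil_append] at h2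
        simp only [pvScan, pvRuns, hlast, hlen, Bool.false_eq_true, if_false,
          List.nil_append, false_and]
        exact h2
      case false.true =>
        have h2 := ih true (k + 1) (k + 1)
        simp only [if_true, List.singleton_append] at h2
        have hc : ((k + 1 : Nat) : Int) - 1 = (k : Int) := by push_cast; ring
        rw [hc] at h2
        simp only [pvScan, pvRuns, hlast, hlen, Bool.false_eq_true, if_false,
          List.nil_append, and_self, false_and, if_true]
        exact h2
      case true.false =>
        have h2 := ih false (k + 1) s
        simp only [Bool.false_eq_true, if_false, List.nil_append] at h2
        simp only [pvScan, pvRuns, hlast, hlen, Bool.false_eq_true, if_false,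
          and_self, and_false, if_true, List.cons_append]
        rw [pvZipMap_cons]
        simp only [List.nil_append]
        rw [h2]
        have hk1 : (k : Int) + 1 = ((k + 1 : Nat) : Int) := by push_cast; ring
        have hs1 : (s : Int) - 1 + 1 = (s : Int) := by ring
        rw [hk1, hs1]
      case true.true =>
        have h2 := ih true (k + 1) s
        simp only [if_true, List.singleton_append] at h2
        simp only [pvScan, pvRuns, hlast, hlen, if_true, List.singleton_append,
          Bool.true_eq_false, and_false, false_and, if_false]
        exact h2

-- B's fold computes the run decomposition
lemma pvBfold (n : Int) :
    ∀ (t : List Char) (i : Nat) (s : Option Int) (acc : List (Int × Int)),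
      (i : Int) + t.length = n →
      (match ((PySem.List.enumerate t (i : Int)).foldl
          (fun (s : Option Int × List (Int × Int)) (p : Int × Char) =>
            if p.2 ∈ numsChars then
              match s.1 with
              | none => (some p.1, s.2)
              | some _ => s
            else
              match s.1 with
              | some b => (none, s.2 ++ [(b, p.1)])
              | none => s)
          (s, acc)).1 with
        | some b => ((PySem.List.enumerate t (i : Int)).foldl
          (fun (s : Option Int × List (Int × Int)) (p : Int × Char) =>
            if p.2 ∈ numsChars then
              match s.1 with
              | none => (some p.1, s.2)
              | some _ => s
            else
              match s.1 with
              | some b => (none, s.2 ++ [(b, p.1)])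
              | none => s)
          (s, acc)).2 ++ [(b, n)]
        | none => ((PySem.List.enumerate t (i : Int)).foldl
          (fun (s : Option Int × List (Int × Int)) (p : Int × Char) =>
            if p.2 ∈ numsChars then
              match s.1 with
              | none => (some p.1, s.2)
              | some _ => s
            else
              match s.1 with
              | some b => (none, s.2 ++ [(b, p.1)])
              | none => s)
          (s, acc)).2)
      = acc ++ pvRuns (t.map pvDig) i s := by
  intro t
  induction t with
  | nil =>
      intro i s acc hn
      cases s with
      | none => simp [PySem.List.enumerate, pvRuns]
      | some x => simp [PySem.List.enumerate, pvRuns, ← hn]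
  | cons c t' ih =>
      intro i s acc hn
      rw [PySem.List.enumerate_cons]
      simp only [List.foldl_cons]
      have hcast : (i : Int) + 1 = ((i + 1 : Nat) : Int) := by push_cast; ring
      have hn' : ((i + 1 : Nat) : Int) + t'.length = n := by
        push_cast [List.length_cons] at hn ⊢; omega
      by_cases hc : c ∈ numsChars
      · cases s with
        | none =>
            simp only [hc, if_pos]
            rw [hcast, ih (i + 1) (some (i : Int)) acc hn']
            simp [pvRuns, pvDig, hc]
        | some x =>
            simp only [hc, if_pos]
            rw [hcast, ih (i + 1) (some x) acc hn']
            simp [pvRuns, pvDig, hc]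
      · cases s with
        | none =>
            simp only [hc, if_neg, not_false_iff]
            rw [hcast, ih (i + 1) none acc hn']
            simp [pvRuns, pvDig, hc]
        | some x =>
            simp only [hc, if_neg, not_false_iff]
            rw [hcast, ih (i + 1) none (acc ++ [(x, (i : Int))]) hn']
            simp [pvRuns, pvDig, hc]

-- closed form for B
lemma pvB_closed (expression : String) :
    separation_of_nums_alt expression
      = pvRuns (expression.toList.map pvDig) 0 none := by
  have h := pvBfold (PySem.Str.len expression) expression.toList 0 none []
    (by simp [PySem.Str.len_eq])
  simp only [Nat.cast_zero, List.nil_append] at h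
  unfold separation_of_nums_alt
  exact h

-- last-character digit test, via the digit mask
lemma pvGetLast : ∀ (t : List Char) (c : Char),
    (((c :: t).getLast (by simp) ∈ numsChars)
      ↔ (List.getLastD (t.map pvDig) (pvDig c) = true)) := by
  intro t
  induction t with
  | nil => intro c; simp [pvDig]
  | cons d t' ih =>
      intro c
      rw [List.getLast_cons_cons]
      simp only [List.map_cons, List.getLastD_cons]
      exact ih d

-- closed form for A on a nonempty string
lemma pvA_closed (expression : String) (h : expression ≠ "") :
    separation_of_nums expression
      = pvRuns (expression.toList.map pvDig) 0 none := by
  simp only [separation_of_nums]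
  have hne : expression.toList ≠ [] :=
    fun hnil => h (String.toList_inj.mp (by simp [hnil]))
  obtain ⟨c, t, hct⟩ := List.exists_cons_of_ne_nil hne
  simp only [hct]
  -- first loop
  have hmap1 := pvSetMap (fun x => if x ∈ numsChars then 'A' else 'B') ' ' (c :: t) []
  simp only [List.nil_append, List.length_nil, Nat.cast_zero, zero_add] at hmap1
  have hlen0 : PySem.List.len (c :: t) = (((c :: t).length : Nat) : Int) := by
    simp [PySem.List.len_eq]
  rw [hlen0, hmap1]
  -- the mapped list is (mask).map pvAB
  have hAB : (c :: t).map (fun x => if x ∈ numsChars then 'A' else 'B')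
      = ((c :: t).map pvDig).map pvAB := by
    rw [List.map_map]
    apply List.map_congr_left
    intro x _
    by_cases hx : x ∈ numsChars <;> simp [pvAB, pvDig, hx, Function.comp]
  rw [hAB]
  -- second loop
  simp only [PySem.List.len_eq]
  have hloop := pvLoop2 ((c :: t).map pvDig) 0 ((c :: t).map pvDig) (by simp) ([], [])
  simp only [Nat.cast_zero, List.nil_append] at hloop
  rw [hloop]
  -- the tail conditionals
  have hlast : PySem.List.pyGetD (c :: t) (-1) ' ' = (c :: t).getLast (by simp) :=
    PySem.List.pyGetD_neg_one (c :: t) ' ' (by simp)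
  have hfirst : PySem.List.pyGetD (c :: t) 0 ' ' = c := PySem.List.pyGetD_zero_cons c t ' '
  simp only [hlast, hfirst]
  have hlenM : (((((c :: t).map pvDig).map pvAB).length : Nat) : Int) - 1
      = (((t.map pvDig).length : Nat) : Int) := by
    simp
  simp only [hlenM]
  have hlastD : ((c :: t).getLast (by simp) ∈ numsChars)
      ↔ (List.getLastD (t.map pvDig) (pvDig c) = true) := pvGetLast t c
  have hkey := pvKey (t.map pvDig) (pvDig c) 0 0
  simp only [Nat.cast_zero, zero_sub, Nat.zero_add, pvZipMap] at hkey
  simp only [List.map_cons]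
  by_cases hcn : c ∈ numsChars
  · have hdc : pvDig c = true := by simp [pvDig, hcn]
    rw [if_pos hcn, hdc]
    by_cases hl : List.getLastD (t.map pvDig) (pvDig c) = true
    · rw [if_pos (hlastD.mpr hl)]
      rw [hdc] at hl
      simp only [hdc, hl, if_true, List.singleton_append] at hkey
      rw [hkey]
      simp [pvRuns]
    · rw [if_neg (fun hx => hl (hlastD.mp hx))]
      have hl' : List.getLastD (t.map pvDig) (pvDig c) = false := eq_false_of_ne_true hl
      rw [hdc] at hl'
      simp only [hdc, hl', Bool.false_eq_true, if_false, if_true, List.singleton_append,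
        List.append_nil] at hkey
      rw [hkey]
      simp [pvRuns]
  · have hdc : pvDig c = false := by simp [pvDig, hcn]
    rw [if_neg hcn, hdc]
    by_cases hl : List.getLastD (t.map pvDig) (pvDig c) = true
    · rw [if_pos (hlastD.mpr hl)]
      rw [hdc] at hl
      simp only [hdc, hl, Bool.false_eq_true, if_false, if_true, List.nil_append] at hkey
      rw [hkey]
      simp [pvRuns]
    · rw [if_neg (fun hx => hl (hlastD.mp hx))]
      have hl' : List.getLastD (t.map pvDig) (pvDig c) = false := eq_false_of_ne_true hl
      rw [hdc] at hl'
      simp only [hdc, hl', Bool.false_eq_true, if_false,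
        List.nil_append, List.append_nil] at hkey
      rw [hkey]
      simp [pvRuns]

-- ===== VERDICT (by name: the statement is the Claim_ definition above) =====
theorem separation_of_nums_spec : Claim_equal_separation_of_nums := by
  intro expression _ hpre
  unfold Spec_separation_of_nums
  rw [pvA_closed expression hpre, pvB_closed expression]
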